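-- pv_equiv track=rewrite | github.com/debdattasarkar/DSA | 2. GFG/0. All/1. Arrays/(M) Shop in Candy Store/py_sol.py | minMaxCandy
-- ===== SOURCE A (Python) =====
-- def minMaxCandy(prices, k):
--     # code here
--     """
--     Returns [min_cost, max_cost] using the classic greedy with two pointers.
--     Time:  O(n log n) due to sorting
--     Space: O(1) extra (sorting in place)
--     """
--     prices.sort()  # sort ascending once
--
--     # ---- Minimum cost: buy cheapest, take k costliest for free ----
--     i, j, min_cost = 0, len(prices) - 1, 0
--     while i <= j:
--         # pay for the cheapest remaining
--         min_cost += prices[i]       # O(1)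
--         i += 1                      # move past the purchased one
--         j -= k                      # take up to k freebies from the right
--
--     # ---- Maximum cost: buy costliest, take k cheapest for free ----
--     i, j, max_cost = 0, len(prices) - 1, 0
--     while i <= j:
--         # pay for the costliest remaining
--         max_cost += prices[j]       # O(1)
--         j -= 1                      # move past the purchased one
--         i += k                      # take up to k freebies from the left
--
--     return [min_cost, max_cost]
-- ===== SOURCE B (Python) =====
-- def minMaxCandy(prices, k):
--     # Same in-place sort side effect as A; returns [min_cost, max_cost]
--     # via a closed-form count of paid candies instead of two pointer loops.
--     prices.sort()
--     n = len(prices)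
--     m = (n + k) // (k + 1)  # number of candies actually paid for
--     return [sum(prices[:m]), sum(prices[n - m:])]
-- ===== Notes on version B (the rewrite author's own statement) =====
-- stated objective: simpler
-- what changed: Replaces A's two two-pointer while-loops with a single closed-form count m = ceil(n/(k+1)) of paid candies and two slice sums (m cheapest / m costliest).
-- outside the precondition, e.g. on minMaxCandy([], -1): A returns [0, 0], B raises ZeroDivisionError
import Mathlib
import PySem

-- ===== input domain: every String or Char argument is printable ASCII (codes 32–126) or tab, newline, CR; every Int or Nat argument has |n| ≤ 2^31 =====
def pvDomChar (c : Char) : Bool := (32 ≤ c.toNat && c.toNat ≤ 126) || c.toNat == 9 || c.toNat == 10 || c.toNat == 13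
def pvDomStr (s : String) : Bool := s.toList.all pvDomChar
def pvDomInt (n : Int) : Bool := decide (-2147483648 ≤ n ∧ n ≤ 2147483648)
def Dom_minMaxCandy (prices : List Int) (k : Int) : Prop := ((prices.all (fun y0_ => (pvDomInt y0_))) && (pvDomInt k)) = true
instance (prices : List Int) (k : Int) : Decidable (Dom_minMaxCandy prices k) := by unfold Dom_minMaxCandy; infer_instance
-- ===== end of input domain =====

-- B replaces A's two two-pointer while-loops with a closed-form paid-candy count m = ceil(n/(k+1))
-- and two slice sums (simpler); both sort in place — equivalence proved for the RETURN value only.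


-- ===== PORT A =====
-- min-cost loop: while i <= j: min_cost += prices[i]; i += 1; j -= k
-- (pyGet? = none is exactly where Python raises IndexError; those inputs are outside Pre_)
def pvLoopMin (xs : List Int) (k : Int) : Nat → Int → Int → Int → Int
  | 0, _, _, acc => acc
  | fuel+1, i, j, acc =>
    if i ≤ j then
      match PySem.List.pyGet? xs i with
      | none => acc              -- IndexError in Python: outside Pre_
      | some p => pvLoopMin xs k fuel (i+1) (j-k) (acc+p)
    else acc

-- max-cost loop: while i <= j: max_cost += prices[j]; j -= 1; i += k
def pvLoopMax (xs : List Int) (k : Int) : Nat → Int → Int → Int → Int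
  | 0, _, _, acc => acc
  | fuel+1, i, j, acc =>
    if i ≤ j then
      match PySem.List.pyGet? xs j with
      | none => acc              -- IndexError in Python: outside Pre_
      | some p => pvLoopMax xs k fuel (i+k) (j-1) (acc+p)
    else acc

def minMaxCandy (prices : List Int) (k : Int) : List Int :=
  let s := PySem.List.sorted prices (fun x => x) false
  let n : Int := s.length
  [pvLoopMin s k (s.length + 1) 0 (n - 1) 0,
   pvLoopMax s k (s.length + 1) 0 (n - 1) 0]

-- ===== PORT B =====
def minMaxCandy_alt (prices : List Int) (k : Int) : List Int :=
  let s := PySem.List.sorted prices (fun x => x) false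
  let n : Int := s.length
  let m := PySem.Int.floordiv (n + k) (k + 1)
  [(PySem.List.slice s none (some m)).sum,
   (PySem.List.slice s (some (n - m)) none).sum]

-- ===== PRECONDITION & SPEC =====
-- Pre_ excludes negative k on nonempty prices, where A raises IndexError, and the single corner
-- ([], -1), where A returns [0,0] but B's closed-form count divides by k+1 (ZeroDivisionError).
def Pre_minMaxCandy (prices : List Int) (k : Int) : Prop := 0 ≤ k ∨ (prices = [] ∧ k ≠ -1)
instance (prices : List Int) (k : Int) : Decidable (Pre_minMaxCandy prices k) := by unfold Pre_minMaxCandy; infer_instance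
def pvWitness_minMaxCandy : List Int × Int := ([3, 1, 2, 4], 1)

def Spec_minMaxCandy (prices : List Int) (k : Int) (out : List Int) : Prop := out = minMaxCandy_alt prices k
instance (prices : List Int) (k : Int) (out : List Int) : Decidable (Spec_minMaxCandy prices k out) := by unfold Spec_minMaxCandy; infer_instance

-- ===== CLAIM (what is proved, stated in full; the proofs are below) =====
def Claim_equal_minMaxCandy : Prop := ∀ (prices : List Int) (k : Int), Dom_minMaxCandy prices k → Pre_minMaxCandy prices k → Spec_minMaxCandy prices k (minMaxCandy prices k)

-- ===== LEMMAS AND PROOFS =====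

-- iteration count of either loop (both transitions shrink j - i by k+1)
def pvCnt (k i j : Int) : Nat := if i ≤ j then (j - i).toNat / (k + 1).toNat + 1 else 0

lemma pvCnt_step (k i j i' j' : Int) (hk : 0 ≤ k) (h : i ≤ j) (hd : j' - i' = j - i - (k + 1)) :
    pvCnt k i j = pvCnt k i' j' + 1 := by
  unfold pvCnt
  rcases le_or_gt (k + 1) (j - i) with hge | hlt
  · have hij' : i' ≤ j' := by omega
    simp only [if_pos h, if_pos hij']
    have h1 : (j' - i').toNat = (j - i).toNat - (k + 1).toNat := by omega
    have h2 : (k + 1).toNat ≤ (j - i).toNat := by omega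
    rw [h1, Nat.div_eq_sub_div (by omega) h2]
  · have hij' : ¬ i' ≤ j' := by omega
    simp only [if_pos h, if_neg hij']
    have hlt' : (j - i).toNat < (k + 1).toNat := by omega
    rw [Nat.div_eq_of_lt hlt']

lemma pvCnt_le (k i j : Int) (hk : 0 ≤ k) (h : i ≤ j) : (pvCnt k i j : Int) ≤ j - i + 1 := by
  unfold pvCnt
  rw [if_pos h]
  have h1 : (j - i).toNat / (k + 1).toNat ≤ (j - i).toNat := Nat.div_le_self _ _
  push_cast
  omega

lemma pvLoopMin_eq (xs : List Int) (k : Int) (hk : 0 ≤ k) :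
    ∀ fuel (i j acc : Int), 0 ≤ i → j < (xs.length : Int) → pvCnt k i j ≤ fuel →
      pvLoopMin xs k fuel i j acc = acc + ((xs.drop i.toNat).take (pvCnt k i j)).sum := by
  intro fuel
  induction fuel with
  | zero =>
    intro i j acc hi hj hcnt
    have h0 : pvCnt k i j = 0 := by omega
    simp [pvLoopMin, h0]
  | succ fuel ih =>
    intro i j acc hi hj hcnt
    by_cases h : i ≤ j
    · have hilt : i.toNat < xs.length := by omega
      have hget : PySem.List.pyGet? xs i = some xs[i.toNat] := by
        conv_lhs => rw [show i = ((i.toNat : Nat) : Int) by omega]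
        rw [PySem.List.pyGet?_natCast, List.getElem?_eq_getElem hilt]
      have hstep : pvCnt k i j = pvCnt k (i + 1) (j - k) + 1 :=
        pvCnt_step k i j (i + 1) (j - k) hk h (by ring)
      have hrec := ih (i + 1) (j - k) (acc + xs[i.toNat]) (by omega) (by omega) (by omega)
      simp only [pvLoopMin, if_pos h, hget]
      rw [hrec, hstep]
      have hdrop : xs.drop i.toNat = xs[i.toNat] :: xs.drop (i.toNat + 1) :=
        List.drop_eq_getElem_cons hilt
      have htn : (i + 1).toNat = i.toNat + 1 := by omega
      rw [htn, hdrop, List.take_succ_cons, List.sum_cons]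
      ring
    · have h0 : pvCnt k i j = 0 := by unfold pvCnt; rw [if_neg h]
      simp [pvLoopMin, if_neg h, h0]

lemma pvLoopMax_eq (xs : List Int) (k : Int) (hk : 0 ≤ k) :
    ∀ fuel (i j acc : Int), 0 ≤ i → j < (xs.length : Int) → pvCnt k i j ≤ fuel →
      pvLoopMax xs k fuel i j acc = acc + ((xs.drop (j + 1 - pvCnt k i j).toNat).take (pvCnt k i j)).sum := by
  intro fuel
  induction fuel with
  | zero =>
    intro i j acc hi hj hcnt
    have h0 : pvCnt k i j = 0 := by omega
    simp [pvLoopMax, h0]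
  | succ fuel ih =>
    intro i j acc hi hj hcnt
    by_cases h : i ≤ j
    · have hjlt : j.toNat < xs.length := by omega
      have hget : PySem.List.pyGet? xs j = some xs[j.toNat] := by
        conv_lhs => rw [show j = ((j.toNat : Nat) : Int) by omega]
        rw [PySem.List.pyGet?_natCast, List.getElem?_eq_getElem hjlt]
      have hstep : pvCnt k i j = pvCnt k (i + k) (j - 1) + 1 :=
        pvCnt_step k i j (i + k) (j - 1) hk h (by ring)
      set c := pvCnt k (i + k) (j - 1) with hc
      have hcle : (c : Int) ≤ j - i := by
        by_cases h2 : i + k ≤ j - 1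
        · have := pvCnt_le k (i + k) (j - 1) hk h2
          omega
        · have h0 : c = 0 := by rw [hc]; unfold pvCnt; rw [if_neg h2]
          omega
      have hrec := ih (i + k) (j - 1) (acc + xs[j.toNat]) (by omega) (by omega) (by omega)
      simp only [pvLoopMax, if_pos h, hget]
      rw [hrec, hstep]
      have hoff : ((j - 1) + 1 - (c : Int)).toNat = (j + 1 - ((c : Int) + 1)).toNat := by omega
      rw [hoff]
      set off := (j + 1 - ((c : Int) + 1)).toNat with hoffdef
      have hoffc : off + c = j.toNat := by omega
      have hlen : c < (xs.drop off).length := by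
        rw [List.length_drop]; omega
      have hsum : ((xs.drop off).take (c + 1)).sum = ((xs.drop off).take c).sum + (xs.drop off)[c] :=
        List.sum_take_succ _ c hlen
      have hidx : (xs.drop off)[c] = xs[j.toNat] := by
        rw [List.getElem_drop]
        have h2 : xs[off + c]? = xs[j.toNat]? := by rw [hoffc]
        have ha : off + c < xs.length := by omega
        rw [List.getElem?_eq_getElem ha, List.getElem?_eq_getElem hjlt] at h2
        exact Option.some_injective _ h2
      push_cast [hstep]
      rw [hsum, hidx]
      ring
    · have h0 : pvCnt k i j = 0 := by unfold pvCnt; rw [if_neg h]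
      simp [pvLoopMax, if_neg h, h0]

-- assembly on the sorted list: both loops equal the two slice sums, for any list and 0 ≤ k
lemma pvMain (xs : List Int) (k : Int) (hk : 0 ≤ k) :
    [pvLoopMin xs k (xs.length + 1) 0 ((xs.length : Int) - 1) 0,
     pvLoopMax xs k (xs.length + 1) 0 ((xs.length : Int) - 1) 0]
    = [(PySem.List.slice xs none (some (PySem.Int.floordiv ((xs.length : Int) + k) (k + 1)))).sum,
       (PySem.List.slice xs (some ((xs.length : Int) - PySem.Int.floordiv ((xs.length : Int) + k) (k + 1))) none).sum] := by
  set n : Int := (xs.length : Int) with hn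
  set c := pvCnt k 0 (n - 1) with hc
  have hcle : (c : Int) ≤ n := by
    by_cases h : (0 : Int) ≤ n - 1
    · have := pvCnt_le k 0 (n - 1) hk h
      omega
    · have h0 : c = 0 := by rw [hc]; unfold pvCnt; rw [if_neg (by omega)]
      omega
  have hnn : (0 : Int) ≤ n := by rw [hn]; positivity
  have hfuel : c ≤ xs.length + 1 := by omega
  have hmin := pvLoopMin_eq xs k hk (xs.length + 1) 0 (n - 1) 0 le_rfl (by omega) hfuel
  have hmax := pvLoopMax_eq xs k hk (xs.length + 1) 0 (n - 1) 0 le_rfl (by omega) hfuel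
  have hm : PySem.Int.floordiv (n + k) (k + 1) = (c : Int) := by
    rw [PySem.Int.floordiv_eq_ediv_of_pos (by omega)]
    rcases eq_or_lt_of_le hnn with h0 | hpos
    · have hc0 : c = 0 := by rw [hc]; unfold pvCnt; rw [if_neg (by omega)]
      rw [← h0, hc0]
      simpa using Int.ediv_eq_zero_of_lt hk (by omega)
    · have hcpos : c = (n - 1).toNat / (k + 1).toNat + 1 := by
        rw [hc]; unfold pvCnt; rw [if_pos (by omega)]; norm_num
      have hsplit : (n + k) / (k + 1) = (n - 1) / (k + 1) + 1 := by
        rw [show n + k = n - 1 + 1 * (k + 1) by ring]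
        exact Int.add_mul_ediv_right (n - 1) 1 (by omega)
      have hcast : (n - 1) / (k + 1) = (((n - 1).toNat / (k + 1).toNat : Nat) : Int) := by
        rw [show n - 1 = (((n - 1).toNat : Nat) : Int) by omega,
            show k + 1 = (((k + 1).toNat : Nat) : Int) by omega]
        exact_mod_cast (Int.natCast_div (n - 1).toNat (k + 1).toNat).symm
      rw [hsplit, hcast, hcpos]
      push_cast
      ring
  have hdroplen : (xs.drop (n - (c : Int)).toNat).length = c := by
    rw [List.length_drop]; omega
  rw [hmin, hmax, hm, ← hc]
  rw [PySem.List.slice_to xs (show (0:Int) ≤ (c:Int) by omega), PySem.List.slice_from xs (show (0:Int) ≤ n - (c:Int) by omega)]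
  rw [show ((c : Int)).toNat = c from Int.toNat_natCast c]
  rw [show (n - 1 + 1 - (c : Int)) = n - (c : Int) by ring]
  rw [show ((0 : Int)).toNat = 0 from rfl, List.drop_zero]
  rw [show (xs.drop (n - (c : Int)).toNat).take c = xs.drop (n - (c : Int)).toNat from
        List.take_of_length_le (by omega)]
  simp

-- ===== VERDICT (by name: the statement is the Claim_ definition above) =====
theorem minMaxCandy_spec : Claim_equal_minMaxCandy := by
  intro prices k _ hpre
  unfold Spec_minMaxCandy minMaxCandy minMaxCandy_alt
  rcases hpre with hk | ⟨hnil, _⟩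
  · exact pvMain (PySem.List.sorted prices (fun x => x) false) k hk
  · subst hnil
    simp [PySem.List.sorted, pvLoopMin, pvLoopMax, PySem.List.slice]
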